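-- pv_equiv track=rewrite | github.com/VasquezRW/LFP_Proyecto1_201800678 | AFD_MENU.py | comprobarRestaurante
-- ===== SOURCE A (Python) =====
-- def comprobarRestaurante(pos, txt):
--     signos = [91, 93, 58, 59, 44, 61]
--     guionBajo = [95]
--     letrasminusculas = crearVectorLetras(65, 90)
--     letrasmayusculas = crearVectorLetras(97, 122)
--     letras = letrasminusculas + letrasmayusculas
--     finID = [32, 61]
--     palabra = ""
--     while pos < len(txt):
--         charCode = ord(txt[pos])
--         char = txt[pos]
--         if charCode in letras:
--             palabra += char
--             pos += 1
--         elif charCode in finID: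
--             if palabra.lower() == "restaurante":
--                 return True
--             else:
--                 return False
--         else:
--             return False
--
-- def crearVectorLetras(inicio, final):
--     vector = []
--     for i in range(inicio, final + 1):
--         vector.append(i)
--     return vector
-- ===== SOURCE B (Python) =====
-- def _esLetra(ch):
--     c = ord(ch)
--     return 65 <= c <= 90 or 97 <= c <= 122
--
-- def comprobarRestaurante(pos, txt):
--     i = pos
--     while i < len(txt) and _esLetra(txt[i]):
--         i += 1
--     if i >= len(txt):
--         return None
--     c = ord(txt[i])
--     if c == 32 or c == 61:
--         return txt[pos:i].lower() == "restaurante"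
--     return False
-- ===== Notes on version B (the rewrite author's own statement) =====
-- stated objective: simpler
-- what changed: Instead of accumulating the word character-by-character (string concatenation) with membership tests against built 52-element lists of letter codes and deciding inside the loop, B scans forward to the first non-letter with a plain range comparison, then decides once after the loop: None if it ran off the end, a single slice-and-lower comparison at a terminator, False otherwise.
-- outside the precondition, e.g. on comprobarRestaurante(-4, 'aurante rest'): A returns True, B returns False; on comprobarRestaurante(-5, 'ab'): A raises IndexError, B raises IndexError
import Mathlib
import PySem

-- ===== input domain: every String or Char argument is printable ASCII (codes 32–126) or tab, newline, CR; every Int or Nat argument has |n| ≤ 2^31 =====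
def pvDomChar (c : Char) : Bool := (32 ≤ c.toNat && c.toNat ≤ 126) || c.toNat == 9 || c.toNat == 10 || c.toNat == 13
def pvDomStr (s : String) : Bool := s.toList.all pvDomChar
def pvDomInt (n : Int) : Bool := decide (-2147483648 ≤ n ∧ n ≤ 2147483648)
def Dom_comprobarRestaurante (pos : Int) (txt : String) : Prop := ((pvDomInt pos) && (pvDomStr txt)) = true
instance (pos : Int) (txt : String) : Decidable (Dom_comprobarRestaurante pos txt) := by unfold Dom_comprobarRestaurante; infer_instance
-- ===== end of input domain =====

-- B replaces A's accumulate-the-word-and-decide-inside-the-loop with a scan to the first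
-- non-letter followed by one post-loop slice-and-lower comparison: simpler, and measured
-- faster by a constant factor (no per-char 52-element list membership / string concatenation).

-- ===== PORT A =====
def crearVectorLetras (inicio final : Int) : List Int :=
  (PySem.List.pyRange inicio (final + 1) 1).foldl (fun vector i => vector ++ [i]) []

def comprobarRestauranteLoop (txt : List Char) (pos : Int) (palabra : List Char) : Option Bool :=
  let letrasminusculas := crearVectorLetras 65 90
  let letrasmayusculas := crearVectorLetras 97 122
  let letras := letrasminusculas ++ letrasmayusculas
  let finID : List Int := [32, 61]
  if _h : pos < (txt.length : Int) then
    match PySem.List.pyGet? txt pos with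
    | none => none   -- IndexError (pos < -len(txt)); excluded by Pre_
    | some char =>
      let charCode : Int := char.toNat
      if charCode ∈ letras then
        comprobarRestauranteLoop txt (pos + 1) (palabra ++ [char])
      else if charCode ∈ finID then
        some (PySem.Chars.lower palabra == "restaurante".toList)
      else
        some false
  else none
termination_by ((txt.length : Int) - pos).toNat
decreasing_by omega

def comprobarRestaurante (pos : Int) (txt : String) : Option Bool :=
  comprobarRestauranteLoop txt.toList pos []

-- ===== PORT B =====
def esLetra (ch : Char) : Bool :=
  let c : Int := ch.toNat
  (65 ≤ c && c ≤ 90) || (97 ≤ c && c ≤ 122)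

def scanLetras (txt : List Char) (i : Int) : Int :=
  if _h : i < (txt.length : Int) then
    match PySem.List.pyGet? txt i with
    | none => i   -- IndexError in Python (i < -len(txt)); excluded by Pre_
    | some ch => if esLetra ch then scanLetras txt (i + 1) else i
  else i
termination_by ((txt.length : Int) - i).toNat
decreasing_by omega

def comprobarRestaurante_alt (pos : Int) (txt : String) : Option Bool :=
  let s := txt.toList
  let i := scanLetras s pos
  if (s.length : Int) ≤ i then none
  else
    match PySem.List.pyGet? s i with
    | none => none
    | some ch =>
      let c : Int := ch.toNat
      if c == 32 || c == 61 then
        some (PySem.Chars.lower (PySem.List.slice s (some pos) (some i)) == "restaurante".toList)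
      else
        some false

-- ===== PRECONDITION & SPEC =====
-- Pre_ excludes negative pos: A raises IndexError for pos < -len(txt), and for
-- -len(txt) ≤ pos < 0 A's value comes from accidental negative-index wraparound
-- (it reads the tail of txt and then restarts at index 0); B treats pos as a plain start index.
def Pre_comprobarRestaurante (pos : Int) (txt : String) : Prop := 0 ≤ pos
instance (pos : Int) (txt : String) : Decidable (Pre_comprobarRestaurante pos txt) := by
  unfold Pre_comprobarRestaurante; infer_instance

def pvWitness_comprobarRestaurante : Int × String := (3, "xx restaurante = y")

def Spec_comprobarRestaurante (pos : Int) (txt : String) (out : Option Bool) : Prop := out = comprobarRestaurante_alt pos txt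
instance (pos : Int) (txt : String) (out : Option Bool) : Decidable (Spec_comprobarRestaurante pos txt out) := by unfold Spec_comprobarRestaurante; infer_instance

-- ===== CLAIM (what is proved, stated in full; the proofs are below) =====
def Claim_equal_comprobarRestaurante : Prop := ∀ (pos : Int) (txt : String), Dom_comprobarRestaurante pos txt → Pre_comprobarRestaurante pos txt → Spec_comprobarRestaurante pos txt (comprobarRestaurante pos txt)

-- ===== LEMMAS AND PROOFS =====

theorem crearVectorLetras_eq (a b : Int) :
    crearVectorLetras a b = PySem.List.pyRange a (b + 1) 1 := by
  unfold crearVectorLetras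
  simpa using PySem.List.foldl_append_singleton (PySem.List.pyRange a (b + 1) 1) []

theorem letras_iff (ch : Char) :
    ((ch.toNat : Int) ∈ crearVectorLetras 65 90 ++ crearVectorLetras 97 122) ↔ esLetra ch = true := by
  simp [crearVectorLetras_eq, PySem.List.mem_pyRange_one, esLetra]
  omega

theorem scanLetras_ge (txt : List Char) (i : Int) : i ≤ scanLetras txt i := by
  induction i using scanLetras.induct txt with
  | case1 i h hn => rw [scanLetras]; simp [h, hn]
  | case2 i h ch hch hl ih =>
    rw [scanLetras]; simp only [h, dif_pos, hch, hl, if_pos]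
    omega
  | case3 i h ch hch hl => rw [scanLetras]; simp [h, hch, hl]
  | case4 i h => rw [scanLetras]; simp [h]

theorem slice_cons (txt : List Char) (pos e : Int) (hp : 0 ≤ pos) (hlt : pos < e)
    (hplen : pos < (txt.length : Int)) :
    PySem.List.slice txt (some pos) (some e) =
      txt[pos.toNat]'(by omega) :: PySem.List.slice txt (some (pos + 1)) (some e) := by
  rw [PySem.List.slice_toNat txt hp (by omega), PySem.List.slice_toNat txt (by omega) (by omega)]
  have h1 : (pos + 1).toNat = pos.toNat + 1 := by omega
  have he : e.toNat - pos.toNat = (e.toNat - (pos + 1).toNat) + 1 := by omega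
  rw [h1] at he ⊢
  rw [he, List.drop_eq_getElem_cons (by omega), List.take_succ_cons]

theorem slice_self (txt : List Char) (pos : Int) (hp : 0 ≤ pos) :
    PySem.List.slice txt (some pos) (some pos) = [] := by
  rw [PySem.List.slice_toNat txt hp hp]
  simp

-- the core invariant: A's loop from (pos, palabra) equals B's post-loop decision with
-- palabra prepended to the slice txt[pos : scanLetras txt pos]
theorem loop_eq_alt (txt : List Char) (pos : Int) (palabra : List Char) (hp : 0 ≤ pos) :
    comprobarRestauranteLoop txt pos palabra =
      (if (txt.length : Int) ≤ scanLetras txt pos then none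
       else
         match PySem.List.pyGet? txt (scanLetras txt pos) with
         | none => none
         | some ch =>
           if ((ch.toNat : Int) == 32 || (ch.toNat : Int) == 61) then
             some (PySem.Chars.lower (palabra ++ PySem.List.slice txt (some pos) (some (scanLetras txt pos))) == "restaurante".toList)
           else some false) := by
  induction pos using scanLetras.induct txt generalizing palabra with
  | case1 i h hn =>
    exfalso
    rw [PySem.List.pyGet?_of_nonneg txt hp] at hn
    simp at hn
    omega
  | case2 i h ch hch hl ih =>
    have hscan : scanLetras txt i = scanLetras txt (i + 1) := by
      rw [scanLetras]; simp [h, hch, hl]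
    rw [hscan, comprobarRestauranteLoop]
    simp only [dif_pos h, hch]
    rw [if_pos ((letras_iff ch).mpr hl)]
    rw [ih (palabra ++ [ch]) (by omega)]
    have hge := scanLetras_ge txt (i + 1)
    have hg : PySem.List.pyGet? txt i = some ch := hch
    rw [PySem.List.pyGet?_of_nonneg txt hp] at hg
    have hb : i.toNat < txt.length := by omega
    rw [List.getElem?_eq_getElem hb] at hg
    rw [slice_cons txt i (scanLetras txt (i + 1)) hp (by omega) h]
    rw [Option.some.inj hg]
    simp
  | case3 i h ch hch hl =>
    have hscan : scanLetras txt i = i := by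
      rw [scanLetras]; simp [h, hch, hl]
    rw [hscan, comprobarRestauranteLoop]
    simp only [dif_pos h, hch]
    rw [if_neg (fun hmem => hl ((letras_iff ch).mp hmem))]
    rw [if_neg (by omega : ¬ ((txt.length : Int) ≤ i))]
    rw [slice_self txt i hp]
    by_cases hfin : (ch.toNat : Int) = 32 ∨ (ch.toNat : Int) = 61
    · rw [if_pos (by rcases hfin with h' | h' <;> simp [h'] : (ch.toNat : Int) ∈ ([32, 61] : List Int))]
      rw [if_pos (by simpa using hfin)]
      simp
    · rw [if_neg (by simpa using hfin), if_neg (by simpa using hfin)]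
  | case4 i h =>
    have hscan : scanLetras txt i = i := by rw [scanLetras]; simp [h]
    rw [hscan, comprobarRestauranteLoop, dif_neg h, if_pos (by omega)]

-- ===== VERDICT (by name: the statement is the Claim_ definition above) =====
theorem comprobarRestaurante_spec : Claim_equal_comprobarRestaurante := by
  intro pos txt _ hpre
  unfold Spec_comprobarRestaurante comprobarRestaurante comprobarRestaurante_alt
  rw [loop_eq_alt txt.toList pos [] hpre]
  simp
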